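-- pv_equiv track=rewrite | github.com/r-earthengine/ee_extra | ee_extra/JavaScript/translate_functions.py | get_text_in_map
-- ===== SOURCE A (Python) =====
-- def get_text_in_map(x):
--     """
--     This function count the number of '(' and ')' after a wild
--     '.map(' appears in a string.
--
--     Args:
--         x (str): A string with a wild '.map('
--
--     Returns:
--         [str]: The string between '.map(' and ')'.
--
--     Examples:
--         >>> from ee_extra import get_text_in_map
--         >>> x = "ic.map(function(x){return y})"
--         >>> get_text_in_map(x)
--     """
--     subgroup = list()
--     counter = 0
--     for lchr in x:
--         if lchr == ")":
--             counter -= 1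
--         if counter > 0:
--             subgroup.append(lchr)
--         if lchr == "(":
--             counter += 1
--     subgroups = "".join(subgroup)
--     return subgroups
-- ===== SOURCE B (Python) =====
-- def get_text_in_map(x):
--     # pass 1: depth BEFORE each character
--     depths = [0]
--     for c in x:
--         depths.append(depths[-1] + (c == "(") - (c == ")"))
--     # pass 2: keep c exactly when its (pre-')' adjusted) depth is positive
--     return "".join(c for c, d in zip(x, depths) if d - (c == ")") > 0)
-- ===== Notes on version B (the rewrite author's own statement) =====
-- stated objective: alternative
-- what changed: replaces A's single fused counter-scan with a two-phase pipeline: first build the prefix paren-depth table, then select characters whose adjusted depth is positive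
import Mathlib
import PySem

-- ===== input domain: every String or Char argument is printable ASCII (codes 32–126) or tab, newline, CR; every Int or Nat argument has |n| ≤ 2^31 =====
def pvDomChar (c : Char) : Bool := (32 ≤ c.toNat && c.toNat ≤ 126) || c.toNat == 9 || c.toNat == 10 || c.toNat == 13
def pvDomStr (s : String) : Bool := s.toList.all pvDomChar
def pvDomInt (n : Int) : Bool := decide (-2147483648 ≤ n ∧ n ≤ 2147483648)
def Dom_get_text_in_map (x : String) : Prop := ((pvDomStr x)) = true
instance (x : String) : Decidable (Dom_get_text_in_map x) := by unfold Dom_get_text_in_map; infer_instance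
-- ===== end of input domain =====

-- B replaces A's single fused counter-scan with a two-phase pipeline (depth table, then selection); objective: alternative decomposition.

-- ===== PORT A =====
-- A's single scan: decrement on ')', append while counter > 0, increment on '('.
def get_text_in_map (x : String) : String :=
  let r := x.toList.foldl (fun (st : Int × List Char) lchr =>
    let counter := if lchr = ')' then st.1 - 1 else st.1
    let subgroup := if counter > 0 then st.2 ++ [lchr] else st.2
    let counter := if lchr = '(' then counter + 1 else counter
    (counter, subgroup)) (0, [])
  String.mk r.2

-- ===== PORT B =====
-- pass 1 of Source B: the prefix paren-depth table (depths after each char; the full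
-- table prepends the initial 0, so zipping gives the depth BEFORE each char)
def pvDepthTail : List Char → Int → List Int
  | [], _ => []
  | c :: r, d =>
    let d' := d + (if c = '(' then 1 else 0) - (if c = ')' then 1 else 0)
    d' :: pvDepthTail r d'

def get_text_in_map_alt (x : String) : String :=
  let cs := x.toList
  let depths := 0 :: pvDepthTail cs 0
  -- pass 2 of Source B: keep c exactly when depth_before - (c == ')') > 0
  String.mk (((cs.zip depths).filter
    (fun p => p.2 - (if p.1 = ')' then 1 else 0) > 0)).map Prod.fst)

-- ===== PRECONDITION & SPEC =====
def Spec_get_text_in_map (x : String) (out : String) : Prop := out = get_text_in_map_alt x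
instance (x : String) (out : String) : Decidable (Spec_get_text_in_map x out) := by unfold Spec_get_text_in_map; infer_instance

-- ===== CLAIM (what is proved, stated in full; the proofs are below) =====
def Claim_equal_get_text_in_map : Prop := ∀ (x : String), Dom_get_text_in_map x → Spec_get_text_in_map x (get_text_in_map x)

-- ===== LEMMAS AND PROOFS =====

-- B's character selection, started at depth k
def pvSel (cs : List Char) (k : Int) : List Char :=
  ((cs.zip (k :: pvDepthTail cs k)).filter
    (fun p => p.2 - (if p.1 = ')' then 1 else 0) > 0)).map Prod.fst

-- invariant relating A's fused scan to B's two-phase selection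
theorem pvFold_eq_sel (cs : List Char) (k : Int) (acc : List Char) :
    (cs.foldl (fun (st : Int × List Char) lchr =>
      let counter := if lchr = ')' then st.1 - 1 else st.1
      let subgroup := if counter > 0 then st.2 ++ [lchr] else st.2
      let counter := if lchr = '(' then counter + 1 else counter
      (counter, subgroup)) (k, acc)).2 = acc ++ pvSel cs k := by
  induction cs generalizing k acc with
  | nil => simp [pvSel]
  | cons c r ih =>
    have hd' : (if c = '(' then (if c = ')' then k - 1 else k) + 1 else (if c = ')' then k - 1 else k))
        = k + (if c = '(' then 1 else 0) - (if c = ')' then 1 else 0) := by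
      by_cases h1 : c = '(' <;> by_cases h2 : c = ')' <;> simp_all
    have hkeep : ((if c = ')' then k - 1 else k) > 0) ↔ (k - (if c = ')' then 1 else 0) > 0) := by
      by_cases h2 : c = ')' <;> simp [h2] <;> omega
    simp only [List.foldl_cons, ih, pvSel, pvDepthTail, List.zip_cons_cons, List.filter_cons]
    rw [hd']
    by_cases hk : k - (if c = ')' then 1 else 0) > 0
    · have h2 : (if c = ')' then (1:Int) else 0) < k := by omega
      have h3 : (0:Int) < (if c = ')' then k - 1 else k) := hkeep.mpr hk
      simp [h2, h3]
    · have h2 : ¬ ((if c = ')' then (1:Int) else 0) < k) := by omega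
      have h3 : ¬ ((0:Int) < (if c = ')' then k - 1 else k)) := fun h => hk (hkeep.mp h)
      simp [h2, h3]

-- ===== VERDICT (by name: the statement is the Claim_ definition above) =====
theorem get_text_in_map_spec : Claim_equal_get_text_in_map := by
  intro x _
  unfold Spec_get_text_in_map get_text_in_map get_text_in_map_alt
  simp only [pvFold_eq_sel, List.nil_append, pvSel]
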